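-- pv_equiv track=rewrite | github.com/PepeObot/HammingCode | prueba.py | fromHtoHH
-- ===== SOURCE A (Python) =====
-- def fromHtoHH(l):
-- 	j=0
-- 	l1 = []
-- 	x=""
-- 	for s in range(len(l)):
-- 		if (2**j == s+1):
-- 			j+=1
-- 		else:
-- 			x += l[s]
-- 	return x
-- ===== SOURCE B (Python) =====
-- def fromHtoHH(l):
--     # Slice out the contiguous segments between power-of-two positions
--     # (1-indexed positions 1,2,4,8,... are skipped, i.e. 0-indexed 0,1,3,7,...).
--     pieces = []
--     start = 0
--     k = 0
--     while 2 ** k <= len(l):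
--         pieces.append(l[start:2 ** k - 1])
--         start = 2 ** k
--         k += 1
--     pieces.append(l[start:])
--     return ''.join(s for piece in pieces for s in piece)
-- ===== Notes on version B (the rewrite author's own statement) =====
-- stated objective: alternative
-- what changed: Replaces the per-element power-of-two counter test with power-of-two-driven slicing: the skipped 1-indexed positions 1,2,4,8,... are generated by doubling, the contiguous segments between them are sliced out whole and joined.
import Mathlib
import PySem

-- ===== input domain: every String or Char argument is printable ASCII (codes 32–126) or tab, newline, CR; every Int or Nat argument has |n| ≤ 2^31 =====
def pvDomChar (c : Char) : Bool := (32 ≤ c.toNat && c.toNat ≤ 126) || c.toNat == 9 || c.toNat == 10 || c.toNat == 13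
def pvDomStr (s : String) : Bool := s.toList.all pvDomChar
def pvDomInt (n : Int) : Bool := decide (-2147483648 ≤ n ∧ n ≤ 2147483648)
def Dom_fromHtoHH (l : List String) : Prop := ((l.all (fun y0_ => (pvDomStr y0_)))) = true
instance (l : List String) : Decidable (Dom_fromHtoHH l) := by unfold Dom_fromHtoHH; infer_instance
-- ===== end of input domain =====

-- B replaces A's per-element power-of-two counter test by power-of-two-driven slicing
-- of the contiguous segments between skipped positions (objective: alternative).

-- ===== PORT A =====
-- loop over s in range(len(l)) with state (j, x); l[s] is in range, so getD is exact
def fromHtoHH (l : List String) : String :=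
  ((List.range l.length).foldl
    (fun (acc : Nat × String) s =>
      if 2 ^ acc.1 = s + 1 then (acc.1 + 1, acc.2)
      else (acc.1, acc.2 ++ l.getD s "")) (0, "")).2

-- ===== PORT B =====
-- the while-loop of Source B: collect slices l[start:2**k-1], then the tail l[start:]
def fromHtoHH_goB (l : List String) (start k : Nat) : List (List String) :=
  if 2 ^ k ≤ l.length then
    PySem.List.slice l (some (start : Int)) (some ((2 ^ k - 1 : Nat) : Int))
      :: fromHtoHH_goB l (2 ^ k) (k + 1)
  else [l.drop start]
termination_by l.length + 1 - 2 ^ k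
decreasing_by
  have h2 : 1 ≤ 2 ^ k := Nat.one_le_two_pow
  simp only [pow_succ]
  omega

def fromHtoHH_alt (l : List String) : String :=
  String.join (fromHtoHH_goB l 0 0).flatten

-- ===== PRECONDITION & SPEC =====
def Spec_fromHtoHH (l : List String) (out : String) : Prop := out = fromHtoHH_alt l
instance (l : List String) (out : String) : Decidable (Spec_fromHtoHH l out) := by unfold Spec_fromHtoHH; infer_instance

-- ===== CLAIM (what is proved, stated in full; the proofs are below) =====
def Claim_equal_fromHtoHH : Prop := ∀ (l : List String), Dom_fromHtoHH l → Spec_fromHtoHH l (fromHtoHH l)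

-- ===== LEMMAS AND PROOFS =====

-- is m a power of two? (m ≥ 1; any exponent k with 2^k = m satisfies k < m)
def pvIsPow (m : Nat) : Bool := (List.range (m + 1)).any (fun k => 2 ^ k == m)

lemma pvIsPow_iff (m : Nat) : pvIsPow m = true ↔ ∃ j, 2 ^ j = m := by
  unfold pvIsPow
  simp only [List.any_eq_true, List.mem_range, beq_iff_eq]
  constructor
  · rintro ⟨j, _, h⟩; exact ⟨j, h⟩
  · rintro ⟨j, h⟩
    exact ⟨j, by have := Nat.lt_two_pow_self (n := j); omega, h⟩

-- the contribution of index s to the output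
def pvG (l : List String) (s : Nat) : String :=
  if pvIsPow (s + 1) then "" else l.getD s ""

-- the reference value: concatenation of pvG over [a, a+n)
def pvCat (l : List String) (a n : Nat) : String :=
  String.join ((List.range' a n).map (pvG l))

lemma pvFoldl_str (xs : List String) (a : String) :
    xs.foldl (· ++ ·) a = a ++ String.join xs := by
  induction xs generalizing a with
  | nil => simp [String.join]
  | cons x xs ih => simp [String.join] at ih ⊢; rw [ih, ih x]; simp [String.append_assoc]

lemma pvJoin_cons (x : String) (xs : List String) :
    String.join (x :: xs) = x ++ String.join xs := by
  show List.foldl _ _ _ = _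
  rw [List.foldl_cons, pvFoldl_str]; simp

lemma pvJoin_append (xs ys : List String) :
    String.join (xs ++ ys) = String.join xs ++ String.join ys := by
  induction xs with
  | nil => simp [String.join]
  | cons x xs ih => simp only [List.cons_append, pvJoin_cons, ih, String.append_assoc]

-- ---- A-side: characterise the loop state ----

def pvJ : Nat → Nat
  | 0 => 0
  | t + 1 => if 2 ^ pvJ t = t + 1 then pvJ t + 1 else pvJ t

lemma pvJ_inv (t : Nat) : t < 2 ^ pvJ t ∧ ∀ k < pvJ t, 2 ^ k ≤ t := by
  induction t with
  | zero => simp [pvJ]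
  | succ t ih =>
    obtain ⟨h1, h2⟩ := ih
    by_cases h : 2 ^ pvJ t = t + 1
    · simp only [pvJ, if_pos h]
      constructor
      · have : 2 ^ (pvJ t + 1) = 2 * 2 ^ pvJ t := by ring
        omega
      · intro k hk
        rcases Nat.lt_succ_iff_lt_or_eq.mp hk with hk' | hk'
        · exact le_trans (h2 k hk') (Nat.le_succ t)
        · subst hk'; omega
    · simp only [pvJ, if_neg h]
      exact ⟨by omega, fun k hk => le_trans (h2 k hk) (Nat.le_succ t)⟩

lemma pvCond_iff (t : Nat) : (2 ^ pvJ t = t + 1) ↔ pvIsPow (t + 1) = true := by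
  rw [pvIsPow_iff]
  constructor
  · intro h; exact ⟨pvJ t, h⟩
  · rintro ⟨j, hj⟩
    obtain ⟨h1, h2⟩ := pvJ_inv t
    by_cases hlt : j < pvJ t
    · have := h2 j hlt; omega
    · have : 2 ^ pvJ t ≤ 2 ^ j := Nat.pow_le_pow_right (by norm_num) (by omega)
      omega

lemma pvCat_zero (l : List String) (a : Nat) : pvCat l a 0 = "" := by
  simp [pvCat, String.join]

lemma pvCat_concat (l : List String) (a n : Nat) :
    pvCat l a (n + 1) = pvCat l a n ++ pvG l (a + n) := by
  unfold pvCat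
  rw [List.range'_concat, List.map_append, pvJoin_append]
  simp [String.join]

lemma pvA_state (l : List String) (t : Nat) :
    (List.range t).foldl
      (fun (acc : Nat × String) s =>
        if 2 ^ acc.1 = s + 1 then (acc.1 + 1, acc.2)
        else (acc.1, acc.2 ++ l.getD s "")) (0, "") = (pvJ t, pvCat l 0 t) := by
  induction t with
  | zero => simp [pvJ, pvCat_zero]
  | succ t ih =>
    rw [List.range_succ, List.foldl_append, ih]
    simp only [List.foldl_cons, List.foldl_nil]
    by_cases h : 2 ^ pvJ t = t + 1
    · have hp : pvIsPow (t + 1) = true := (pvCond_iff t).mp h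
      rw [if_pos h]
      have : pvCat l 0 (t + 1) = pvCat l 0 t := by
        rw [pvCat_concat]; simp [pvG, hp]
      simp [pvJ, h, this]
    · have hp : ¬ pvIsPow (t + 1) = true := fun hh => h ((pvCond_iff t).mpr hh)
      rw [if_neg h]
      have : pvCat l 0 (t + 1) = pvCat l 0 t ++ l.getD t "" := by
        rw [pvCat_concat]; simp [pvG, hp]
      simp [pvJ, h, this]

lemma pvA_eq (l : List String) : fromHtoHH l = pvCat l 0 l.length := by
  unfold fromHtoHH
  rw [pvA_state]

-- ---- B-side ----

lemma pvTake_drop_eq_map (l : List String) (a m : Nat) (h : a + m ≤ l.length) :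
    (l.drop a).take m = (List.range' a m).map (fun s => l.getD s "") := by
  apply List.ext_getElem
  · simp; omega
  · intro i h1 h2
    have hi : i < m := by simpa using h2
    have hl : a + i < l.length := by omega
    simp [List.getElem_take, List.getElem_drop, List.getElem_range',
      List.getD_eq_getElem?_getD, List.getElem?_eq_getElem hl]

lemma pvDrop_eq_map (l : List String) (a : Nat) :
    l.drop a = (List.range' a (l.length - a)).map (fun s => l.getD s "") := by
  by_cases h : a ≤ l.length
  · have := pvTake_drop_eq_map l a (l.length - a) (by omega)
    rwa [List.take_of_length_le (by simp)] at this
  · rw [List.drop_eq_nil_of_le (by omega)]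
    have : l.length - a = 0 := by omega
    simp [this]

lemma pvB_else (l : List String) (start k : Nat) (h : ¬ 2 ^ k ≤ l.length)
    (hpow : ∀ j, 2 ^ j < 2 ^ k → 2 ^ j ≤ start) :
    String.join (fromHtoHH_goB l start k).flatten = pvCat l start (l.length - start) := by
  rw [fromHtoHH_goB, if_neg h]
  simp only [List.flatten_cons, List.flatten_nil, List.append_nil]
  rw [pvDrop_eq_map]
  unfold pvCat
  congr 1
  apply List.map_congr_left
  intro s hs
  rw [List.mem_range'_1] at hs
  have hnp : pvIsPow (s + 1) = false := by
    by_contra hc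
    have : pvIsPow (s + 1) = true := by
      cases hh : pvIsPow (s + 1) <;> simp_all
    obtain ⟨j, hj⟩ := (pvIsPow_iff _).mp this
    have := hpow j (by omega)
    omega
  simp [pvG, hnp]

lemma pvB_main (l : List String) :
    ∀ n start k, l.length + 1 - 2 ^ k ≤ n →
      (∀ j, 2 ^ j < 2 ^ k → 2 ^ j ≤ start) → start < 2 ^ k →
      String.join (fromHtoHH_goB l start k).flatten = pvCat l start (l.length - start) := by
  intro n
  induction n with
  | zero =>
    intro start k hn hpow _
    exact pvB_else l start k (by omega) hpow
  | succ n ih =>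
    intro start k hn hpow hlt
    by_cases h : 2 ^ k ≤ l.length
    · rw [fromHtoHH_goB, if_pos h]
      have hk1 : 1 ≤ 2 ^ k := Nat.one_le_two_pow
      have hks : 2 ^ (k + 1) = 2 * 2 ^ k := by ring
      have ih' := ih (2 ^ k) (k + 1) (by simp only [pow_succ]; omega)
        (fun j hj => by
          have : j ≤ k := by
            by_contra hc
            have : 2 ^ (k + 1) ≤ 2 ^ j := Nat.pow_le_pow_right (by norm_num) (by omega)
            omega
          exact Nat.pow_le_pow_right (by norm_num) this)
        (by omega)
      rw [List.flatten_cons, pvJoin_append, ih']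
      have hslice : PySem.List.slice l (some (start : Int)) (some ((2 ^ k - 1 : Nat) : Int))
          = (l.drop start).take (2 ^ k - 1 - start) := PySem.List.slice_natCast l start (2 ^ k - 1)
      rw [hslice, pvTake_drop_eq_map l start (2 ^ k - 1 - start) (by omega)]
      -- on [start, 2^k - 1) nothing is skipped
      have hcongr : (List.range' start (2 ^ k - 1 - start)).map (fun s => l.getD s "")
          = (List.range' start (2 ^ k - 1 - start)).map (pvG l) := by
        apply List.map_congr_left
        intro s hs
        rw [List.mem_range'_1] at hs
        have hnp : pvIsPow (s + 1) = false := by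
          by_contra hc
          have : pvIsPow (s + 1) = true := by
            cases hh : pvIsPow (s + 1) <;> simp_all
          obtain ⟨j, hj⟩ := (pvIsPow_iff _).mp this
          have := hpow j (by omega)
          omega
        simp [pvG, hnp]
      rw [hcongr]
      -- split the reference concatenation at 2^k - 1 and 2^k
      have hsplit : pvCat l start (l.length - start)
          = pvCat l start (2 ^ k - 1 - start) ++ (pvG l (2 ^ k - 1) ++ pvCat l (2 ^ k) (l.length - 2 ^ k)) := by
        unfold pvCat
        have e1 : List.range' start (l.length - start)
            = List.range' start (2 ^ k - 1 - start) ++ List.range' (2 ^ k - 1) (1 + (l.length - 2 ^ k)) := by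
          have e := List.range'_append (s := start) (m := 2 ^ k - 1 - start)
            (n := 1 + (l.length - 2 ^ k)) (step := 1)
          rw [one_mul, show start + (2 ^ k - 1 - start) = 2 ^ k - 1 by omega,
            show (2 ^ k - 1 - start) + (1 + (l.length - 2 ^ k)) = l.length - start by omega] at e
          exact e.symm
        have e2 : List.range' (2 ^ k - 1) (1 + (l.length - 2 ^ k))
            = (2 ^ k - 1) :: List.range' (2 ^ k) (l.length - 2 ^ k) := by
          have : 1 + (l.length - 2 ^ k) = (l.length - 2 ^ k) + 1 := by omega
          rw [this, List.range'_succ, show 2 ^ k - 1 + 1 = 2 ^ k by omega]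
        rw [e1, e2, List.map_append, pvJoin_append, List.map_cons, pvJoin_cons]
      rw [hsplit]
      have hg : pvG l (2 ^ k - 1) = "" := by
        have hp : pvIsPow (2 ^ k - 1 + 1) = true := by
          rw [pvIsPow_iff]; exact ⟨k, by omega⟩
        simp [pvG, hp]
      rw [hg]
      simp [pvCat]
    · exact pvB_else l start k h hpow

lemma pvB_eq (l : List String) : fromHtoHH_alt l = pvCat l 0 l.length := by
  unfold fromHtoHH_alt
  rw [pvB_main l (l.length + 1) 0 0 (by omega) (fun j hj => by simp at hj) (by norm_num)]
  simp

-- ===== VERDICT (by name: the statement is the Claim_ definition above) =====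
theorem fromHtoHH_spec : Claim_equal_fromHtoHH := by
  intro l _
  unfold Spec_fromHtoHH
  rw [pvA_eq, pvB_eq]
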